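-- pv_equiv track=rewrite | github.com/jenhuluck/Optimization-of-MVICFG-generated-from-Hydrogen | testcases/tiny-web-server/simply_MVICFG.py | map_to_weight
-- ===== SOURCE A (Python) =====
-- def map_to_weight(line,argc):
-- 	counter = 0
-- 	num = 0
-- 	for n in range(1,argc):
-- 		s = "V"+str(n)
-- 		if s in line:
-- 			num = n
-- 			counter += 1
-- 	if counter == argc-1:
-- 		return argc
-- 	else:
-- 		return num
-- ===== SOURCE B (Python) =====
-- def map_to_weight(line, argc):
--     # One scan of line: collect the values of all no-leading-zero digit-run
--     # prefixes that follow a 'V'; then count/max only those below argc.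
--     vals = set()
--     n = len(line)
--     for i in range(n):
--         if line[i] == 'V':
--             v = 0
--             j = i + 1
--             while j < n and '0' <= line[j] <= '9' and not (v == 0 and line[j] == '0'):
--                 v = v * 10 + (ord(line[j]) - 48)
--                 vals.add(v)
--                 j += 1
--     good = {v for v in vals if v < argc}
--     if len(good) == argc - 1:
--         return argc
--     return max(good, default=0)
-- ===== Notes on version B (the rewrite author's own statement) =====
-- stated objective: faster
-- what changed: A tests 'V'+str(n) substring membership for every n in range(1,argc); B scans line once, collecting the values of all no-leading-zero digit-run prefixes that follow a 'V' into a set, then counts and maximises the collected values below argc.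
import Mathlib
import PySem

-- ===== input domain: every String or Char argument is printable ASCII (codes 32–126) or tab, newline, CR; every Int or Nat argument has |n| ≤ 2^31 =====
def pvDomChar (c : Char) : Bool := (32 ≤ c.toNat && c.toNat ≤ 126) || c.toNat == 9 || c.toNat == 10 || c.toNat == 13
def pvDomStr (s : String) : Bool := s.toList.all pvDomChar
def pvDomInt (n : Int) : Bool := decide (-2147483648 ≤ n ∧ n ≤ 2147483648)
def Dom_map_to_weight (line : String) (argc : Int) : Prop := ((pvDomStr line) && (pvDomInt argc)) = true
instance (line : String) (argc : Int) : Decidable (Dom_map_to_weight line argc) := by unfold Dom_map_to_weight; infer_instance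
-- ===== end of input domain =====

-- B replaces A's O(argc·|line|) substring loop by one scan of line collecting the
-- "V<digits>" prefix values into a set, then counts/maximises those below argc.

-- ===== PORT A =====
def map_to_weight (line : String) (argc : Int) : Int :=
  -- state (counter, num); for n in range(1, argc): if "V"+str(n) in line: num = n; counter += 1
  let st := (PySem.List.pyRange 1 argc 1).foldl
    (fun (st : Int × Int) n =>
      if PySem.Str.isIn ("V" ++ PySem.Int.toStr n) line then (st.1 + 1, n) else st)
    (0, 0)
  if st.1 = argc - 1 then argc else st.2

-- ===== PORT B =====
-- inner while loop of B: values of the no-leading-zero digit prefixes after a 'V'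
def pvRun (cs : List Char) (v : Int) : List Int :=
  match cs with
  | [] => []
  | c :: rest =>
    if ('0' ≤ c ∧ c ≤ '9') ∧ ¬(v = 0 ∧ c = '0') then
      (v * 10 + ((c.toNat : Int) - 48)) :: pvRun rest (v * 10 + ((c.toNat : Int) - 48))
    else []

-- outer for loop of B: at each 'V', collect the run values
def pvScan (cs : List Char) : List Int :=
  match cs with
  | [] => []
  | c :: rest => (if c = 'V' then pvRun rest 0 else []) ++ pvScan rest

def map_to_weight_alt (line : String) (argc : Int) : Int :=
  let vals : PySem.Set Int := PySem.Set.ofList (pvScan line.toList)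
  let good : PySem.Set Int := vals.filter (fun v => decide (v < argc))
  if PySem.Set.len good = argc - 1 then argc
  else PySem.List.maxD good (fun x => x) 0

-- ===== PRECONDITION & SPEC =====
def Spec_map_to_weight (line : String) (argc : Int) (out : Int) : Prop := out = map_to_weight_alt line argc
instance (line : String) (argc : Int) (out : Int) : Decidable (Spec_map_to_weight line argc out) := by unfold Spec_map_to_weight; infer_instance

-- ===== CLAIM (what is proved, stated in full; the proofs are below) =====
def Claim_equal_map_to_weight : Prop := ∀ (line : String) (argc : Int), Dom_map_to_weight line argc → Spec_map_to_weight line argc (map_to_weight line argc)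

-- ===== LEMMAS AND PROOFS =====

-- value of a digit string pushed onto accumulator v (the loop of B's inner while)
def pvPush (v : Int) (d : List Char) : Int := d.foldl (fun a c => a * 10 + ((c.toNat : Int) - 48)) v

-- a no-leading-zero decimal digit string
def pvOkStr (d : List Char) : Prop :=
  d ≠ [] ∧ (∀ c ∈ d, '0' ≤ c ∧ c ≤ '9') ∧ d.head? ≠ some '0'

-- decimal printing of a Nat, back-to-front (what Nat.toDigits computes)
def pvDec (n : Nat) : List Char :=
  if _h : n < 10 then [Nat.digitChar n] else pvDec (n / 10) ++ [Nat.digitChar (n % 10)]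
decreasing_by exact Nat.div_lt_self (by omega) (by omega)

theorem pvPush_append (v : Int) (xs : List Char) (c : Char) :
    pvPush v (xs ++ [c]) = pvPush v xs * 10 + ((c.toNat : Int) - 48) := by
  simp [pvPush, List.foldl_append]

theorem pvPush_ge (d : List Char) (v : Int) (hv : 0 ≤ v)
    (hd : ∀ c ∈ d, '0' ≤ c ∧ c ≤ '9') : v ≤ pvPush v d ∧ 0 ≤ pvPush v d := by
  induction d generalizing v with
  | nil => simp [pvPush]; omega
  | cons c rest ih =>
    have hc := hd c (by simp)
    have h1 : (48:Nat) ≤ c.toNat := hc.1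
    have h2 : c.toNat ≤ 57 := hc.2
    have := ih (v * 10 + ((c.toNat : Int) - 48)) (by omega) (fun x hx => hd x (by simp [hx]))
    simp only [pvPush, List.foldl_cons] at *
    omega

theorem pvOk_pos (d : List Char) (h : pvOkStr d) : 1 ≤ pvPush 0 d := by
  obtain ⟨hne, hdig, hhd⟩ := h
  cases d with
  | nil => exact absurd rfl hne
  | cons c rest =>
    have hc := hdig c (by simp)
    have h1 : (48:Nat) ≤ c.toNat := hc.1
    have hne0 : c ≠ '0' := by
      intro h; rw [h] at hhd; simp at hhd
    have h49 : 49 ≤ c.toNat := by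
      rcases Nat.lt_or_ge 48 c.toNat with h | h
      · omega
      · exfalso; apply hne0; apply Char.ext; apply UInt32.toNat_inj.mp
        show c.toNat = Char.toNat '0'
        have h0 : Char.toNat '0' = 48 := rfl
        omega
    have := pvPush_ge rest (0 * 10 + ((c.toNat : Int) - 48)) (by omega)
      (fun x hx => hdig x (by simp [hx]))
    simp only [pvPush, List.foldl_cons] at *
    omega

theorem mem_pvRun (cs : List Char) (v : Int) (hv : 0 ≤ v) (w : Int) :
    w ∈ pvRun cs v ↔ ∃ d, (∀ c ∈ d, '0' ≤ c ∧ c ≤ '9') ∧ d ≠ [] ∧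
      (v = 0 → d.head? ≠ some '0') ∧ d <+: cs ∧ w = pvPush v d := by
  induction cs generalizing v with
  | nil =>
    simp only [pvRun, List.not_mem_nil, false_iff]
    rintro ⟨d, _, hne, _, hpre, _⟩
    exact hne (List.prefix_nil.mp hpre)
  | cons c rest ih =>
    by_cases hcond : (('0' ≤ c ∧ c ≤ '9') ∧ ¬(v = 0 ∧ c = '0'))
    · have hdigc : '0' ≤ c ∧ c ≤ '9' := hcond.1
      have h48 : (48:Nat) ≤ c.toNat := hdigc.1
      have h57 : c.toNat ≤ 57 := hdigc.2
      set v' := v * 10 + ((c.toNat : Int) - 48) with hv'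
      have hv'pos : 1 ≤ v' := by
        rcases Nat.lt_or_ge 48 c.toNat with h | h
        · omega
        · have hc0 : c = '0' := by
            apply Char.ext; apply UInt32.toNat_inj.mp
            show c.toNat = Char.toNat '0'
            have h0 : Char.toNat '0' = 48 := rfl
            omega
          have hv0 : ¬ v = 0 := fun hh => hcond.2 ⟨hh, hc0⟩
          omega
      rw [pvRun, if_pos hcond]
      constructor
      · intro hw
        rcases List.mem_cons.mp hw with hw | hw
        · exact ⟨[c], by simpa using hdigc, by simp, by
            intro hv0; simp
            intro hc0
            exact hcond.2 ⟨hv0, hc0⟩, by simp, by simp [pvPush, hw]⟩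
        · obtain ⟨d, hd1, hd2, _, hd4, hd5⟩ := (ih v' (by omega) ).mp hw
          refine ⟨c :: d, ?_, by simp, ?_, by simpa using hd4, ?_⟩
          · intro x hx; rcases List.mem_cons.mp hx with h | h
            · exact h ▸ hdigc
            · exact hd1 x h
          · intro hv0; simp
            intro hc0
            exact hcond.2 ⟨hv0, hc0⟩
          · simp [pvPush, List.foldl_cons] at hd5 ⊢
            exact hd5
      · rintro ⟨d, hd1, hd2, hd3, hd4, hd5⟩
        cases d with
        | nil => exact absurd rfl hd2
        | cons c0 d' =>
          obtain ⟨hc0, hd'pre⟩ : c0 = c ∧ d' <+: rest := List.cons_prefix_cons.mp hd4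
          subst hc0
          cases d' with
          | nil =>
            apply List.mem_cons.mpr; left
            simp [pvPush, List.foldl_cons] at hd5
            omega
          | cons e d'' =>
            apply List.mem_cons_of_mem
            apply (ih v' (by omega)).mpr
            exact ⟨e :: d'', fun x hx => hd1 x (List.mem_cons_of_mem _ hx), by simp,
              fun hh => absurd hh (by omega), hd'pre, by
                simp [pvPush, List.foldl_cons] at hd5 ⊢
                exact hd5⟩
    · rw [pvRun, if_neg hcond]
      simp only [List.not_mem_nil, false_iff]
      rintro ⟨d, hd1, hd2, hd3, hd4, hd5⟩
      cases d with
      | nil => exact absurd rfl hd2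
      | cons c0 d' =>
        have hc0 : c0 = c := (List.cons_prefix_cons.mp hd4).1
        subst hc0
        apply hcond
        refine ⟨hd1 c0 (by simp), ?_⟩
        rintro ⟨hv0, hc'⟩
        exact (hd3 hv0) (by simp [hc'])

theorem mem_pvScan (cs : List Char) (w : Int) :
    w ∈ pvScan cs ↔ ∃ t, ('V' :: t) <:+ cs ∧ w ∈ pvRun t 0 := by
  induction cs with
  | nil =>
    simp only [pvScan, List.not_mem_nil, false_iff]
    rintro ⟨t, ht, _⟩
    have := List.suffix_nil.mp ht
    simp at this
  | cons c rest ih =>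
    rw [pvScan]
    simp only [List.mem_append, ih]
    constructor
    · rintro (hw | ⟨t, ht, hw⟩)
      · by_cases hc : c = 'V'
        · rw [if_pos hc] at hw
          exact ⟨rest, by rw [hc], hw⟩
        · rw [if_neg hc] at hw; simp at hw
      · exact ⟨t, List.suffix_cons_iff.mpr (Or.inr ht), hw⟩
    · rintro ⟨t, ht, hw⟩
      rcases List.suffix_cons_iff.mp ht with heq | ht'
      · left
        injection heq with h1 h2
        rw [if_pos h1.symm, ← h2]
        exact hw
      · exact Or.inr ⟨t, ht', hw⟩

theorem pvDigitChar (m : Nat) (h : m < 10) : (Nat.digitChar m).toNat = 48 + m := by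
  interval_cases m <;> rfl

theorem pvDigitCharRange (m : Nat) (h : m < 10) : '0' ≤ Nat.digitChar m ∧ Nat.digitChar m ≤ '9' := by
  interval_cases m <;> exact ⟨by decide, by decide⟩

theorem pvDec_spec (n : Nat) :
    (∀ c ∈ pvDec n, '0' ≤ c ∧ c ≤ '9') ∧ pvDec n ≠ [] ∧
    (1 ≤ n → (pvDec n).head? ≠ some '0') ∧ pvPush 0 (pvDec n) = (n : Int) := by
  induction n using pvDec.induct with
  | case1 n h =>
    rw [pvDec, dif_pos h]
    have htn : (Nat.digitChar n).toNat = 48 + n := pvDigitChar n h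
    refine ⟨?_, by simp, ?_, ?_⟩
    · intro c hc
      rcases List.mem_singleton.mp hc with rfl
      exact pvDigitCharRange n h
    · intro hn
      simp only [List.head?_cons, ne_eq, Option.some.injEq]
      intro heq
      have := congrArg Char.toNat heq
      have h0 : Char.toNat '0' = 48 := rfl
      omega
    · simp only [pvPush, List.foldl_cons, List.foldl_nil]
      have hrfl : (Nat.digitChar n).toNat = (Nat.digitChar n).val.toBitVec.toNat := rfl
      omega
  | case2 n h ih =>
    rw [pvDec, dif_neg h]
    obtain ⟨ih1, ih2, ih3, ih4⟩ := ih
    have hmod : n % 10 < 10 := by omega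
    have htn : (Nat.digitChar (n % 10)).toNat = 48 + n % 10 := pvDigitChar _ hmod
    refine ⟨?_, by simp [ih2], ?_, ?_⟩
    · intro c hc
      rcases List.mem_append.mp hc with hc | hc
      · exact ih1 c hc
      · rcases List.mem_singleton.mp hc with rfl
        exact pvDigitCharRange _ hmod
    · intro _
      rw [List.head?_append_of_ne_nil _ ih2]
      exact ih3 (by omega)
    · rw [pvPush_append, ih4]
      have hrfl : (Nat.digitChar (n % 10)).toNat = (Nat.digitChar (n % 10)).val.toBitVec.toNat := rfl
      push_cast
      omega

theorem pvCore (f : Nat) : ∀ n l, n < f → Nat.toDigitsCore 10 f n l = pvDec n ++ l := by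
  induction f with
  | zero => intro n l h; omega
  | succ f ih =>
    intro n l h
    simp only [Nat.toDigitsCore]
    by_cases h10 : n / 10 = 0
    · rw [if_pos h10]
      have hn : n < 10 := by omega
      rw [pvDec, dif_pos hn]
      have : n % 10 = n := by omega
      rw [this]
      simp
    · rw [if_neg h10]
      have hn : ¬ n < 10 := by omega
      have hlt : n / 10 < f := by
        have : n / 10 < n := Nat.div_lt_self (by omega) (by omega)
        omega
      rw [ih (n / 10) _ hlt]
      conv_rhs => rw [pvDec]
      rw [dif_neg hn]
      simp

theorem toDigits_eq_pvDec (n : Nat) : Nat.toDigits 10 n = pvDec n := by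
  have := pvCore (n + 1) n [] (by omega)
  simpa [Nat.toDigits] using this

theorem pvVal_inj (d1 d2 : List Char)
    (h1 : (∀ c ∈ d1, '0' ≤ c ∧ c ≤ '9') ∧ d1.head? ≠ some '0')
    (h2 : (∀ c ∈ d2, '0' ≤ c ∧ c ≤ '9') ∧ d2.head? ≠ some '0')
    (h : pvPush 0 d1 = pvPush 0 d2) : d1 = d2 := by
  induction d1 using List.reverseRecOn generalizing d2 with
  | nil =>
    rcases List.eq_nil_or_concat d2 with rfl | ⟨ys, b, rfl⟩
    · rfl
    · exfalso
      simp only [List.concat_eq_append] at *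
      have h1' : 1 ≤ pvPush 0 (ys ++ [b]) := pvOk_pos _ ⟨by simp, h2.1, h2.2⟩
      have h0 : pvPush 0 ([] : List Char) = 0 := rfl
      omega
  | append_singleton xs c ih =>
    rcases List.eq_nil_or_concat d2 with rfl | ⟨ys, b, rfl⟩
    · exfalso
      have h1' : 1 ≤ pvPush 0 (xs ++ [c]) := pvOk_pos _ ⟨by simp, h1.1, h1.2⟩
      have h0 : pvPush 0 ([] : List Char) = 0 := rfl
      omega
    · simp only [List.concat_eq_append] at *
      rw [pvPush_append, pvPush_append] at h
      have hc := h1.1 c (by simp)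
      have hb := h2.1 b (by simp)
      have hc1 : (48:Nat) ≤ c.toNat := hc.1
      have hc2 : c.toNat ≤ 57 := hc.2
      have hb1 : (48:Nat) ≤ b.toNat := hb.1
      have hb2 : b.toNat ≤ 57 := hb.2
      have hxs0 : 0 ≤ pvPush 0 xs := (pvPush_ge xs 0 le_rfl (fun x hx => h1.1 x (by simp [hx]))).2
      have hys0 : 0 ≤ pvPush 0 ys := (pvPush_ge ys 0 le_rfl (fun x hx => h2.1 x (by simp [hx]))).2
      have heq1 : pvPush 0 xs = pvPush 0 ys ∧ (c.toNat : Int) = (b.toNat : Int) := by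
        constructor <;> omega
      have hcb : c = b := by
        apply Char.ext; apply UInt32.toNat_inj.mp
        exact_mod_cast heq1.2
      have hxy : xs = ys := by
        apply ih
        · exact ⟨fun x hx => h1.1 x (by simp [hx]), by
            cases xs with
            | nil => simp
            | cons a t =>
              have := h1.2
              simpa using this⟩
        · exact ⟨fun x hx => h2.1 x (by simp [hx]), by
            cases ys with
            | nil => simp
            | cons a t =>
              have := h2.2
              simpa using this⟩
        · exact heq1.1
      rw [hcb, hxy]

-- bridge: "V"+str(n) occurs in line ↔ n is one of B's scanned values (n ≥ 1)
theorem pvBridge (line : String) (n : Int) (hn : 1 ≤ n) :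
    PySem.Str.isIn ("V" ++ PySem.Int.toStr n) line = true ↔ n ∈ pvScan line.toList := by
  rw [PySem.Str.isIn_iff_infix]
  have htl : ("V" ++ PySem.Int.toStr n).toList = 'V' :: pvDec n.toNat := by
    rw [String.toList_append, PySem.Int.toList_toStr]
    have : PySem.Int.toChars n = Nat.toDigits 10 n.toNat := by
      unfold PySem.Int.toChars
      rw [if_neg (by omega : ¬ n < 0)]
    rw [this, toDigits_eq_pvDec]
    rfl
  rw [htl]
  obtain ⟨hdig, hne, hhd, hval⟩ := pvDec_spec n.toNat
  have hm1 : 1 ≤ n.toNat := by omega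
  have hvaln : pvPush 0 (pvDec n.toNat) = n := by
    rw [hval]; omega
  constructor
  · intro hinf
    obtain ⟨t, hpre, hsuf⟩ := List.infix_iff_prefix_suffix.mp hinf
    cases t with
    | nil => exact absurd (List.prefix_nil.mp hpre) (by simp)
    | cons c t' =>
      obtain ⟨hc, hpre'⟩ := List.cons_prefix_cons.mp hpre
      subst hc
      apply (mem_pvScan _ _).mpr
      refine ⟨t', hsuf, ?_⟩
      apply (mem_pvRun t' 0 le_rfl n).mpr
      exact ⟨pvDec n.toNat, hdig, hne, fun _ => hhd hm1, hpre', hvaln.symm⟩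
  · intro hmem
    obtain ⟨t, hsuf, hrun⟩ := (mem_pvScan _ _).mp hmem
    obtain ⟨d, hd1, hd2, hd3, hd4, hd5⟩ := (mem_pvRun t 0 le_rfl n).mp hrun
    have hdeq : d = pvDec n.toNat := by
      apply pvVal_inj
      · exact ⟨hd1, hd3 rfl⟩
      · exact ⟨hdig, hhd hm1⟩
      · rw [← hd5, hvaln]
    apply List.infix_iff_prefix_suffix.mpr
    exact ⟨'V' :: t, List.cons_prefix_cons.mpr ⟨rfl, hdeq ▸ hd4⟩, hsuf⟩

theorem pvScan_pos (cs : List Char) (w : Int) (h : w ∈ pvScan cs) : 1 ≤ w := by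
  obtain ⟨t, _, hrun⟩ := (mem_pvScan _ _).mp h
  obtain ⟨d, hd1, hd2, hd3, _, hd5⟩ := (mem_pvRun t 0 le_rfl w).mp hrun
  rw [hd5]
  exact pvOk_pos d ⟨hd2, hd1, hd3 rfl⟩

-- A's num-fold over an increasing list: default, or the largest matching element
theorem pvLastMatch (Q : Int → Bool) (l : List Int) (hl : l.Pairwise (· < ·)) (a0 : Int) :
    (l.foldl (fun a n => if Q n then n else a) a0 = a0 ∧ ∀ n ∈ l, ¬ Q n = true) ∨
    (Q (l.foldl (fun a n => if Q n then n else a) a0) = true ∧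
     (l.foldl (fun a n => if Q n then n else a) a0) ∈ l ∧
     ∀ n ∈ l, Q n = true → n ≤ l.foldl (fun a n => if Q n then n else a) a0) := by
  induction l using List.reverseRecOn with
  | nil => left; simp
  | append_singleton t x ih =>
    rw [List.foldl_append]
    obtain ⟨hpt, -, hxlt⟩ := List.pairwise_append.mp hl
    have hxlt' : ∀ n ∈ t, n < x := fun n hn => hxlt n hn x (by simp)
    by_cases hq : Q x
    · right
      rw [List.foldl_cons, List.foldl_nil, if_pos hq]
      refine ⟨hq, by simp, ?_⟩
      intro n hn _
      rcases List.mem_append.mp hn with hn | hn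
      · exact le_of_lt (hxlt' n hn)
      · rcases List.mem_singleton.mp hn with rfl; rfl
    · rw [List.foldl_cons, List.foldl_nil, if_neg hq]
      rcases ih hpt with ⟨heq, hnone⟩ | ⟨hq', hmem, hmax⟩
      · left
        refine ⟨heq, ?_⟩
        intro n hn
        rcases List.mem_append.mp hn with hn | hn
        · exact hnone n hn
        · rcases List.mem_singleton.mp hn with rfl; simpa using hq
      · right
        refine ⟨hq', List.mem_append.mpr (Or.inl hmem), ?_⟩
        intro n hn hqn
        rcases List.mem_append.mp hn with hn | hn
        · exact hmax n hn hqn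
        · rcases List.mem_singleton.mp hn with rfl; exact absurd hqn (by simpa using hq)

-- the two sides of the equivalence, assembled
theorem pvMain (line : String) (argc : Int) :
    map_to_weight line argc = map_to_weight_alt line argc := by
  simp only [map_to_weight, map_to_weight_alt]
  set Q : Int → Bool := fun n => PySem.Str.isIn ("V" ++ PySem.Int.toStr n) line with hQ
  set R := PySem.List.pyRange 1 argc 1 with hR
  set S := pvScan line.toList with hS
  set good := (PySem.Set.ofList S).filter (fun v => decide (v < argc)) with hgood
  set N := R.foldl (fun a n => if Q n then n else a) 0 with hN
  -- the A-fold splits into the counter fold and the num fold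
  have hfun : (fun (st : Int × Int) n =>
      if PySem.Str.isIn ("V" ++ PySem.Int.toStr n) line then (st.1 + 1, n) else st) =
      (fun (st : Int × Int) n =>
        (if Q n = true then st.1 + 1 else st.1, if Q n = true then n else st.2)) := by
    funext st n
    have hrw : PySem.Str.isIn ("V" ++ PySem.Int.toStr n) line = Q n := rfl
    rw [hrw]
    by_cases h : Q n
    · simp [h]
    · simp [h]
  rw [hfun,
    PySem.List.foldl_prod_mk (f := fun (a : Int) m => if Q m = true then a + 1 else a)
      (g := fun (a : Int) m => if Q m = true then m else a),
    PySem.List.foldl_count_if, zero_add]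
  -- membership in good
  have hmemgood : ∀ v : Int, v ∈ good ↔ v ∈ S ∧ v < argc := by
    intro v
    rw [hgood, List.mem_filter, PySem.Set.mem_ofList]
    simp
  have hgoodR : ∀ v ∈ good, v ∈ R := by
    intro v hv
    rw [hR]
    have := (hmemgood v).mp hv
    exact PySem.List.mem_pyRange_one.mpr ⟨pvScan_pos _ _ this.1, this.2⟩
  have hQmem : ∀ n ∈ R, (Q n = true ↔ n ∈ good) := by
    intro n hn
    obtain ⟨h1, h2⟩ := PySem.List.mem_pyRange_one.mp (hR ▸ hn)
    rw [hQ, hmemgood]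
    simp only []
    rw [pvBridge line n h1]
    constructor
    · exact fun h => ⟨h, h2⟩
    · exact fun h => h.1
  -- counter = len good
  have hcount : (R.countP Q : Int) = PySem.Set.len good := by
    have hnd1 : (R.filter Q).Nodup := (PySem.List.nodup_pyRange_one 1 argc).filter Q
    have hnd2 : good.Nodup := (PySem.Set.nodup_ofList S).filter _
    have hperm : (R.filter Q).Perm good := by
      rw [List.perm_ext_iff_of_nodup hnd1 hnd2]
      intro v
      rw [List.mem_filter]
      constructor
      · rintro ⟨hv, hq⟩; exact (hQmem v hv).mp hq
      · intro hv; exact ⟨hgoodR v hv, (hQmem v (hgoodR v hv)).mpr hv⟩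
    rw [List.countP_eq_length_filter, hperm.length_eq]
    simp [PySem.Set.len]
  -- num = max good
  have hnum : N = PySem.List.maxD good (fun x => x) 0 := by
    rcases pvLastMatch Q R (PySem.List.pairwise_lt_pyRange_one 1 argc) 0 with
      ⟨heq, hnone⟩ | ⟨hq', hmem, hmax⟩
    · have hgnil : good = [] := by
        apply List.eq_nil_iff_forall_not_mem.mpr
        intro v hv
        exact hnone v (hgoodR v hv) ((hQmem v (hgoodR v hv)).mpr hv)
      rw [← hN] at heq
      rw [heq, hgnil]
      rfl
    · rw [← hN] at hq' hmem hmax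
      have hNgood : N ∈ good := (hQmem N hmem).mp hq'
      cases hmx : PySem.List.max? good (fun x => x) with
      | none =>
        exact absurd ((PySem.List.max?_eq_none_iff good _).mp hmx ▸ hNgood) (by simp)
      | some m =>
        have hm : m ∈ good := PySem.List.max?_mem hmx
        have h1 : m ≤ N := hmax m (hgoodR m hm) ((hQmem m (hgoodR m hm)).mpr hm)
        have h2 : N ≤ m := PySem.List.max?_isMax hmx N hNgood
        have : N = m := le_antisymm h2 h1
        rw [PySem.List.maxD, hmx, this]
        rfl
  rw [hcount, ← hN, hnum]

-- ===== VERDICT (by name: the statement is the Claim_ definition above) =====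
theorem map_to_weight_spec : Claim_equal_map_to_weight := by
  intro line argc _
  unfold Spec_map_to_weight
  exact pvMain line argc
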